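-- pv_equiv track=rewrite | github.com/dddd2024/reverse-agent | reverse_agent/sample_solver.py | _wide_prefix_metrics
-- ===== SOURCE A (Python) =====
-- SAMPLEREVERSE_TARGET_PREFIX = "flag{".encode("utf-16le")
--
-- def _to_lower_ascii(value: int) -> int:
--     if 0x41 <= value <= 0x5A:
--         return value + 0x20
--     return value
--
-- def _wide_prefix_metrics(prefix_hex: str) -> tuple[int, int]:
--     try:
--         raw = bytes.fromhex(prefix_hex)
--     except Exception:
--         return (0, 0)
--     char_count = min(len(raw) // 2, len(SAMPLEREVERSE_TARGET_PREFIX) // 2)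
--     contiguous = 0
--     matched = 0
--     for idx in range(char_count):
--         raw_code = raw[idx * 2] | (raw[idx * 2 + 1] << 8)
--         target_code = (
--             SAMPLEREVERSE_TARGET_PREFIX[idx * 2]
--             | (SAMPLEREVERSE_TARGET_PREFIX[idx * 2 + 1] << 8)
--         )
--         if _to_lower_ascii(raw_code) == _to_lower_ascii(target_code):
--             matched += 1
--             if idx == contiguous:
--                 contiguous += 1
--     return contiguous, matched
-- ===== SOURCE B (Python) =====
-- # B: byte-level comparison against the lowercase target bytes b"flag{".
-- # Correct because the target's UTF-16LE high bytes are all zero and its low bytes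
-- # (0x61..0x7B) are never the image of ASCII lowercasing ambiguity: a 16-bit unit
-- # case-folds to the target unit iff its high byte is 0 and its lowercased low byte
-- # equals the target byte.  raw is split by stride slicing into a folded low-byte
-- # stream and a high-byte stream; contiguous is computed by recursion, matched by a
-- # zip count.
-- SAMPLEREVERSE_TARGET_LOW = b"flag{"
--
-- def _to_lower_ascii(value: int) -> int:
--     if 0x41 <= value <= 0x5A:
--         return value + 0x20
--     return value
--
-- def _wide_prefix_metrics(prefix_hex: str) -> tuple[int, int]:
--     try:
--         raw = bytes.fromhex(prefix_hex)
--     except Exception: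
--         return (0, 0)
--     n = min(len(raw) // 2, len(SAMPLEREVERSE_TARGET_LOW))
--     folded = [_to_lower_ascii(b) for b in raw[:2 * n:2]]
--     his = list(raw[1:2 * n:2])
--
--     def contiguous_from(i: int) -> int:
--         if i < n and his[i] == 0 and folded[i] == SAMPLEREVERSE_TARGET_LOW[i]:
--             return 1 + contiguous_from(i + 1)
--         return 0
--
--     matched = sum(
--         1 for lo, hi, t in zip(folded, his, SAMPLEREVERSE_TARGET_LOW)
--         if hi == 0 and lo == t
--     )
--     return (contiguous_from(0), matched)
-- ===== Notes on version B (the rewrite author's own statement) =====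
-- stated objective: alternative
-- what changed: A forms 16-bit UTF-16LE code units and case-folds them inside one interleaved counting loop; B never builds code units: it splits the bytes into low/high streams by stride slicing, lowercases the low stream once and compares it byte-wise against the literal lowercase target bytes (valid because the target's high bytes are zero), computing contiguous by recursion and matched by a zip count.
import Mathlib
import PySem

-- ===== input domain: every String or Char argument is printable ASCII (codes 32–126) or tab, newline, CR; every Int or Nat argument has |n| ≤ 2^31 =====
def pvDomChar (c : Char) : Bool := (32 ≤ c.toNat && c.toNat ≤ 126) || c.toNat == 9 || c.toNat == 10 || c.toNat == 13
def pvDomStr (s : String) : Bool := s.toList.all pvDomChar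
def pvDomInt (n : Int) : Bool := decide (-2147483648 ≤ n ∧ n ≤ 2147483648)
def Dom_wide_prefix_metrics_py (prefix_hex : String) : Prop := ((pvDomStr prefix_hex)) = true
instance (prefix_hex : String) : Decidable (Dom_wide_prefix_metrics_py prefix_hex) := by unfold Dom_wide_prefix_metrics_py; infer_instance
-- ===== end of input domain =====

-- B replaces A's 16-bit-code loop by byte-level work: split the bytes into low/high streams
-- by stride slicing, lowercase the lows once, compare against the literal lowercase target
-- bytes; contiguous by recursion, matched by a zip count.  Objective: alternative, same cost.

-- ===== PORT A =====
-- "flag{".encode("utf-16le") as a byte list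
def pvTargetBytes : List Nat := [102, 0, 108, 0, 97, 0, 103, 0, 123, 0]

def pvToLowerAscii (v : Nat) : Nat := if 0x41 ≤ v ∧ v ≤ 0x5A then v + 0x20 else v

-- CPython's bytes.fromhex skips the six ASCII whitespace characters between byte pairs
def pvIsHexSpace (c : Char) : Bool :=
  c == ' ' || c == '\t' || c == '\n' || c == '\r' || c.toNat == 11 || c.toNat == 12

def pvHexVal? (c : Char) : Option Nat :=
  if '0' ≤ c ∧ c ≤ '9' then some (c.toNat - 48)
  else if 'a' ≤ c ∧ c ≤ 'f' then some (c.toNat - 87)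
  else if 'A' ≤ c ∧ c ≤ 'F' then some (c.toNat - 55)
  else none

-- bytes.fromhex: none = the ValueError that the try/except turns into (0, 0); exact on ASCII input
def pvFromHex? : List Char → Option (List Nat)
  | [] => some []
  | c :: rest =>
    if pvIsHexSpace c then pvFromHex? rest
    else
      match rest with
      | [] => none
      | d :: rest' =>
        match pvHexVal? c, pvHexVal? d with
        | some hi, some lo => (pvFromHex? rest').map (fun bs => (hi * 16 + lo) :: bs)
        | _, _ => none

-- raw[idx*2] | (raw[idx*2+1] << 8); every access A makes is in range (idx < len/2)
def pvCodeAt (bs : List Nat) (idx : Nat) : Nat :=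
  bs.getD (idx * 2) 0 ||| (bs.getD (idx * 2 + 1) 0) <<< 8

def wide_prefix_metrics_py (prefix_hex : String) : Int × Int :=
  match pvFromHex? prefix_hex.toList with
  | none => (0, 0)
  | some raw =>
    let charCount := min (raw.length / 2) (pvTargetBytes.length / 2)
    (List.range charCount).foldl
      (fun (st : Int × Int) idx =>
        if pvToLowerAscii (pvCodeAt raw idx) = pvToLowerAscii (pvCodeAt pvTargetBytes idx) then
          let matched := st.2 + 1
          if (idx : Int) = st.1 then (st.1 + 1, matched) else (st.1, matched)
        else st)
      ((0 : Int), (0 : Int))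

-- ===== PORT B =====
-- b"flag{": the target's UTF-16LE low bytes (its high bytes are all zero)
def pvTgtLow : List Nat := [102, 108, 97, 103, 123]

-- l[::2] (every other element); exact for the extended slices [:2n:2] and [1:2n:2] B uses
def pvEveryOther : List Nat → List Nat
  | [] => []
  | [a] => [a]
  | a :: _ :: rest => a :: pvEveryOther rest

-- contiguous_from(i) of Source B
def pvContig (his folded : List Nat) (n : Nat) (i : Nat) : Int :=
  if i < n then
    if his.getD i 0 = 0 ∧ folded.getD i 0 = pvTgtLow.getD i 0 then
      1 + pvContig his folded n (i + 1)
    else 0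
  else 0
termination_by n - i

def wide_prefix_metrics_py_alt (prefix_hex : String) : Int × Int :=
  match pvFromHex? prefix_hex.toList with
  | none => (0, 0)
  | some raw =>
    let n := min (raw.length / 2) pvTgtLow.length
    let folded := (pvEveryOther (raw.take (2 * n))).map pvToLowerAscii
    let his := pvEveryOther ((raw.take (2 * n)).drop 1)
    let matched : Int :=
      ((folded.zip his).zip pvTgtLow).countP (fun x => decide (x.1.2 = 0 ∧ x.1.1 = x.2))
    (pvContig his folded n 0, matched)

-- ===== PRECONDITION & SPEC =====
def Spec_wide_prefix_metrics_py (prefix_hex : String) (out : Int × Int) : Prop := out = wide_prefix_metrics_py_alt prefix_hex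
instance (prefix_hex : String) (out : Int × Int) : Decidable (Spec_wide_prefix_metrics_py prefix_hex out) := by unfold Spec_wide_prefix_metrics_py; infer_instance

-- ===== CLAIM (what is proved, stated in full; the proofs are below) =====
def Claim_equal_wide_prefix_metrics_py : Prop := ∀ (prefix_hex : String), Dom_wide_prefix_metrics_py prefix_hex → Spec_wide_prefix_metrics_py prefix_hex (wide_prefix_metrics_py prefix_hex)

-- ===== LEMMAS AND PROOFS =====

lemma pv_lead_le (l : List Bool) : (l.takeWhile id).length ≤ l.length := by
  induction l with
  | nil => simp
  | cons b t ih => cases b <;> simp [List.takeWhile_cons] <;> omega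

lemma pv_lead_append (l : List Bool) (b : Bool) :
    ((l ++ [b]).takeWhile id).length =
      if (l.takeWhile id).length = l.length then l.length + (if b then 1 else 0)
      else (l.takeWhile id).length := by
  induction l with
  | nil => cases b <;> simp [List.takeWhile]
  | cons a t ih =>
    have hle := pv_lead_le t
    cases a
    · simp
    · by_cases h : (t.takeWhile id).length = t.length <;>
        cases b <;> simp [ih, h] <;> omega

-- A's fold computes (leading-true-run length, number of trues) of the match table
lemma pv_foldA_eq (q : Nat → Prop) [DecidablePred q] (n : ℕ) :
    (List.range n).foldl
      (fun (st : Int × Int) idx =>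
        if q idx then
          let matched := st.2 + 1
          if (idx : Int) = st.1 then (st.1 + 1, matched) else (st.1, matched)
        else st)
      ((0 : Int), (0 : Int))
      = (((((List.range n).map (fun i => decide (q i))).takeWhile id).length : Int),
         ((((List.range n).map (fun i => decide (q i))).count true : Nat) : Int)) := by
  induction n with
  | zero => simp
  | succ n ih =>
    rw [List.range_succ, List.foldl_append, List.map_append, ih]
    set l := (List.range n).map (fun i => decide (q i)) with hl
    have hlen : l.length = n := by simp [hl]
    have hle := pv_lead_le l
    have hcnt : (l ++ [decide (q n)]).count true = l.count true + (if q n then 1 else 0) := by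
      by_cases h : q n <;> simp [List.count_append, h]
    have hlead := pv_lead_append l (decide (q n))
    by_cases hq : q n
    · have hd : decide (q n) = true := decide_eq_true hq
      rw [hd] at hlead
      rw [if_pos hq] at hcnt
      simp only [List.foldl_cons, List.foldl_nil, if_pos hq]
      by_cases hall : (l.takeWhile id).length = l.length
      · rw [if_pos hall] at hlead
        simp at hlead
        have h1 : ((n : Int)) = ((l.takeWhile id).length : Int) := by omega
        simp [← h1, hd, hcnt, hlen, Prod.ext_iff] <;> omega
      · rw [if_neg hall] at hlead
        have h1 : ((n : Int)) ≠ ((l.takeWhile id).length : Int) := by omega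
        simp [h1, hd, hcnt, Prod.ext_iff] <;> omega
    · have hd : decide (q n) = false := decide_eq_false hq
      rw [hd] at hlead
      rw [if_neg hq] at hcnt
      split_ifs at hlead with hall
      all_goals try exact (‹False›).elim
      all_goals simp [hq, hcnt, Prod.ext_iff]
      all_goals omega

lemma pv_everyOther_getD : ∀ (l : List Nat) (i : Nat), (pvEveryOther l).getD i 0 = l.getD (2 * i) 0 := by
  intro l
  fun_induction pvEveryOther l with
  | case1 => intro i; simp
  | case2 a =>
    intro i
    cases i <;> simp [pvEveryOther]
  | case3 a b rest ih =>
    intro i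
    cases i with
    | zero => simp [pvEveryOther]
    | succ j =>
      have h2 : 2 * (j + 1) = (2 * j) + 1 + 1 := by omega
      simp only [List.getD_cons_succ, h2]
      exact ih j

lemma pv_everyOther_length : ∀ (l : List Nat), (pvEveryOther l).length = (l.length + 1) / 2 := by
  intro l
  fun_induction pvEveryOther l with
  | case1 => simp
  | case2 a => simp
  | case3 a b rest ih => simp [ih]; omega

-- a zip-zip count is a count over indices up to the shortest length
lemma pv_zipzip_countP :
    ∀ (u v w : List Nat) (f : (Nat × Nat) × Nat → Bool),
      ((u.zip v).zip w).countP f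
        = (List.range (min (min u.length v.length) w.length)).countP
            (fun i => f ((u.getD i 0, v.getD i 0), w.getD i 0)) := by
  intro u
  induction u with
  | nil => intro v w f; simp
  | cons a u ih =>
    intro v w f
    cases v with
    | nil => simp
    | cons b v =>
      cases w with
      | nil => simp
      | cons c w =>
        have hmin : min (min (a :: u).length (b :: v).length) (c :: w).length
            = min (min u.length v.length) w.length + 1 := by
          simp [Nat.succ_min_succ]
        rw [hmin, List.range_succ_eq_map]
        simp only [List.zip_cons_cons, List.countP_cons, List.countP_map, ih]
        refine congrArg₂ _ (List.countP_congr ?_) rfl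
        intro i _
        simp [Function.comp]

-- the single numeric fact B relies on: for a target unit t with zero high byte and
-- 0x61 ≤ t ≤ 0x7B, a 16-bit unit case-folds to t iff its high byte is 0 and its
-- lowercased low byte is t
lemma pv_fold_or (L H t : Nat) (ht : 0x61 ≤ t ∧ t ≤ 0x7B) :
    (pvToLowerAscii (L ||| H <<< 8) = t) ↔ (H = 0 ∧ pvToLowerAscii L = t) := by
  by_cases hH : H = 0
  · subst hH; simp
  · have h1 : (256 : Nat) ≤ H <<< 8 := by
      rw [Nat.shiftLeft_eq]
      have : 1 ≤ H := Nat.one_le_iff_ne_zero.mpr hH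
      calc (256 : Nat) = 1 * 2 ^ 8 := by norm_num
        _ ≤ H * 2 ^ 8 := Nat.mul_le_mul_right _ this
    have h2 : 256 ≤ L ||| H <<< 8 := le_trans h1 Nat.right_le_or
    have h3 : t < pvToLowerAscii (L ||| H <<< 8) := by
      unfold pvToLowerAscii; split_ifs <;> omega
    constructor
    · intro h; omega
    · rintro ⟨h0, -⟩; exact absurd h0 hH

-- Source B's recursion computes the leading-true run of the tail table from index i
lemma pv_contig_eq (his folded : List Nat) (n : Nat) :
    ∀ i, pvContig his folded n i
      = ((((List.range' i (n - i)).map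
            (fun j => decide (his.getD j 0 = 0 ∧ folded.getD j 0 = pvTgtLow.getD j 0))).takeWhile id).length : Int) := by
  intro i
  fun_induction pvContig his folded n i with
  | case1 i hi hP ih =>
    have hr : n - i = (n - (i + 1)) + 1 := by omega
    have hd : (decide (his.getD i 0 = 0 ∧ folded.getD i 0 = pvTgtLow.getD i 0)) = true :=
      decide_eq_true hP
    rw [hr, List.range'_succ]
    simp only [List.map_cons, List.takeWhile_cons, id_eq, hd, if_true, List.length_cons, ih]
    push_cast; ring
  | case2 i hi hP =>
    have hr : n - i = (n - (i + 1)) + 1 := by omega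
    have hd : (decide (his.getD i 0 = 0 ∧ folded.getD i 0 = pvTgtLow.getD i 0)) = false :=
      decide_eq_false hP
    rw [hr, List.range'_succ]
    simp only [List.map_cons, List.takeWhile_cons, id_eq, hd]
    simp
  | case3 i hi =>
    have hr : n - i = 0 := by omega
    simp [hr]

-- ===== VERDICT (by name: the statement is the Claim_ definition above) =====
theorem wide_prefix_metrics_py_spec : Claim_equal_wide_prefix_metrics_py := by
  intro s _
  unfold Spec_wide_prefix_metrics_py wide_prefix_metrics_py wide_prefix_metrics_py_alt
  cases h : pvFromHex? s.toList with
  | none => rfl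
  | some raw =>
    simp only []
    set n := min (raw.length / 2) pvTgtLow.length with hn
    have htl5 : pvTgtLow.length = 5 := rfl
    have htb10 : pvTargetBytes.length = 10 := rfl
    have hn5 : n ≤ 5 := by rw [hn, htl5]; exact Nat.min_le_right _ _
    have hnr : 2 * n ≤ raw.length := by
      have : n ≤ raw.length / 2 := by simp [hn]
      omega
    have hcc : min (raw.length / 2) (pvTargetBytes.length / 2) = n := by
      rw [hn, htl5, htb10]
    set folded := (pvEveryOther (raw.take (2 * n))).map pvToLowerAscii with hfolded
    set his := pvEveryOther ((raw.take (2 * n)).drop 1) with hhis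
    have htake : (raw.take (2 * n)).length = 2 * n := by simp; omega
    have hflen : folded.length = n := by
      simp [hfolded, pv_everyOther_length, htake]; omega
    have hhlen : his.length = n := by
      simp [hhis, pv_everyOther_length, htake]
      omega
    -- index computations
    have hfget : ∀ i, i < n → folded.getD i 0 = pvToLowerAscii (raw.getD (2 * i) 0) := by
      intro i hi
      have h1 : i < (pvEveryOther (raw.take (2 * n))).length := by
        rw [pv_everyOther_length, htake]; omega
      rw [hfolded, List.getD_eq_getElem?_getD, List.getElem?_map]
      rw [List.getElem?_eq_getElem h1]
      simp only [Option.map_some, Option.getD_some]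
      congr 1
      have := pv_everyOther_getD (raw.take (2 * n)) i
      rw [List.getD_eq_getElem?_getD, List.getElem?_eq_getElem h1] at this
      simp only [Option.getD_some] at this
      rw [this, List.getD_eq_getElem?_getD, List.getElem?_take]
      simp only [if_pos (by omega : 2 * i < 2 * n)]
      rw [List.getD_eq_getElem?_getD]
    have hhget : ∀ i, i < n → his.getD i 0 = raw.getD (2 * i + 1) 0 := by
      intro i hi
      rw [hhis, pv_everyOther_getD, List.getD_eq_getElem?_getD, List.getElem?_drop,
        List.getElem?_take]
      simp only [if_pos (by omega : 1 + 2 * i < 2 * n)]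
      rw [show 1 + 2 * i = 2 * i + 1 from by omega, List.getD_eq_getElem?_getD]
    -- pointwise: the byte test equals A's folded-code test
    have hpq : ∀ i, i < n →
        (decide (his.getD i 0 = 0 ∧ folded.getD i 0 = pvTgtLow.getD i 0)
          = decide (pvToLowerAscii (pvCodeAt raw i) = pvToLowerAscii (pvCodeAt pvTargetBytes i))) := by
      intro i hi
      have hi5 : i < 5 := by omega
      have htgt : pvToLowerAscii (pvCodeAt pvTargetBytes i) = pvTgtLow.getD i 0 ∧
          0x61 ≤ pvTgtLow.getD i 0 ∧ pvTgtLow.getD i 0 ≤ 0x7B := by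
        interval_cases i <;> decide
      rw [hfget i hi, hhget i hi]
      have := pv_fold_or (raw.getD (2 * i) 0) (raw.getD (2 * i + 1) 0)
        (pvTgtLow.getD i 0) ⟨htgt.2.1, htgt.2.2⟩
      rw [htgt.1]
      unfold pvCodeAt
      have h2i : i * 2 = 2 * i := by ring
      rw [h2i]
      simp only [decide_eq_decide]
      rw [this]
    -- both sides via the common match table
    rw [hcc]
    rw [pv_foldA_eq (fun idx => pvToLowerAscii (pvCodeAt raw idx) = pvToLowerAscii (pvCodeAt pvTargetBytes idx)) n]
    have htbl : (List.range n).map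
          (fun i => decide (pvToLowerAscii (pvCodeAt raw i) = pvToLowerAscii (pvCodeAt pvTargetBytes i)))
        = (List.range n).map
          (fun j => decide (his.getD j 0 = 0 ∧ folded.getD j 0 = pvTgtLow.getD j 0)) := by
      apply List.map_congr_left
      intro i hi
      exact (hpq i (List.mem_range.mp hi)).symm
    rw [htbl]
    refine Prod.ext ?_ ?_
    · -- contiguous
      rw [pv_contig_eq his folded n 0]
      simp [← List.range_eq_range']
    · -- matched
      have hm : min (min folded.length his.length) pvTgtLow.length = n := by
        rw [hflen, hhlen, htl5]; omega
      rw [pv_zipzip_countP, hm]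
      simp only [List.count_eq_countP, List.countP_map]
      congr 1
      refine List.countP_congr ?_
      intro i _
      simp [Function.comp]
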